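-- pv_equiv track=rewrite | github.com/ikokkari/PythonProblems | labs109.py | self_describe
-- ===== SOURCE A (Python) =====
-- def self_describe(items):
--     c, best = dict(), len(items)
--     for e in items:
--         c[e] = c.get(e, 0) + 1
--
--     def partition(n, k, sofar):
--         if n == 0:
--             yield sofar[:]
--         else:
--             while k * (k + 1) >= 2 * n:
--                 sofar.append(k)
--                 yield from partition(n - k, min(n - k, k - 1), sofar)
--                 sofar.pop()
--                 k = k - 1
--
--     for p in partition(len(items), len(items), []):
--         best = min(best, sum(max(0, x - c.get(x, 0)) for x in p))
--     return best
-- ===== SOURCE B (Python) =====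
-- def self_describe(items):
--     n = len(items)
--     c = {}
--     for e in items:
--         c[e] = c.get(e, 0) + 1
--     dp = [0] + [n + 1] * n
--     for v in range(1, n + 1):
--         cost = max(0, v - c.get(v, 0))
--         dp = [dp[s] if s < v else min(dp[s], dp[s - v] + cost) for s in range(n + 1)]
--     return dp[n]
-- ===== Notes on version B (the rewrite author's own statement) =====
-- stated objective: faster
-- what changed: Replaces A's exponential enumeration of all distinct-part partitions (recursive generator) with an O(n^2) 0/1-knapsack DP over sums 0..n with items 1..n of cost max(0, v - count(v)).
import Mathlib
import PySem

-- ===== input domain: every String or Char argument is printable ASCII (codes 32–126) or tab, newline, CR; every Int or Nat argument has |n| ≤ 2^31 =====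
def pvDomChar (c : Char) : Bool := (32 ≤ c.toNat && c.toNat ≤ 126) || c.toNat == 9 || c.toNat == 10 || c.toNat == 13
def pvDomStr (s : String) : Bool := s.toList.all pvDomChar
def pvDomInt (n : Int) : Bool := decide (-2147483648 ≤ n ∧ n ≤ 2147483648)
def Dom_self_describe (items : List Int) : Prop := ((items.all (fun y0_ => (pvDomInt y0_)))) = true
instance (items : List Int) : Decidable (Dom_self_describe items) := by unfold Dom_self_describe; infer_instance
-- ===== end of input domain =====

-- B replaces A's exponential enumeration of all distinct-part partitions with an
-- O(n^2) 0/1-knapsack DP over sums 0..n (items 1..n, cost max(0, v - count(v))).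

-- ===== PORT A =====
-- A's generator `partition(n, k, sofar)` yields all partitions of n into distinct
-- parts ≤ k; ported as a function returning the list of suffixes appended after
-- `sofar` (the yielded list is sofar ++ suffix; costs are sums so the prefix split
-- is value-identical).  All integers reachable from the top-level call
-- partition(len(items), len(items), []) are nonnegative with k ≤ n, so the Nat
-- arithmetic (n - k, k - 1, min) is exact there.
def partsA : Nat → Nat → List (List Nat)
  | n, k =>
    if _h1 : n = 0 then [[]]
    else if _h2 : 2 * n ≤ k * (k + 1) then
      ((partsA (n - k) (min (n - k) (k - 1))).map (fun p => k :: p)) ++ partsA n (k - 1)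
    else []
termination_by n k => (n, k)
decreasing_by
  · have hk : 1 ≤ k := by
      rcases Nat.eq_zero_or_pos k with h | h
      · subst h; simp at _h2; omega
      · exact h
    apply Prod.Lex.left; omega
  · have hk : 1 ≤ k := by
      rcases Nat.eq_zero_or_pos k with h | h
      · subst h; simp at _h2; omega
      · exact h
    apply Prod.Lex.right; omega

def self_describe (items : List Int) : Int :=
  let c := items.foldl (fun d e => d.insert e (d.getD e 0 + 1)) PySem.Dict.empty
  (partsA items.length items.length).foldl
    (fun best p =>
      min best (p.foldl (fun (acc : Int) (x : Nat) => acc + max 0 ((x : Int) - c.getD (x : Int) 0)) 0))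
    (items.length : Int)

-- ===== PORT B =====
-- dp row update: dp = [dp[s] if s < v else min(dp[s], dp[s-v]+cost) for s in range(n+1)]
def bRow (n : Nat) (cost : Nat → Int) : Nat → List Int
  | 0 => 0 :: List.replicate n ((n : Int) + 1)      -- [0] + [n+1]*n
  | v + 1 =>
    let prev := bRow n cost v
    (List.range (n + 1)).map (fun s =>
      if s < v + 1 then prev.getD s 0
      else min (prev.getD s 0) (prev.getD (s - (v + 1)) 0 + cost (v + 1)))

def self_describe_alt (items : List Int) : Int :=
  let n := items.length
  let c := items.foldl (fun d e => d.insert e (d.getD e 0 + 1)) PySem.Dict.empty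
  (bRow n (fun v => max 0 ((v : Int) - c.getD (v : Int) 0)) n).getD n 0

-- ===== PRECONDITION & SPEC =====
def Spec_self_describe (items : List Int) (out : Int) : Prop := out = self_describe_alt items
instance (items : List Int) (out : Int) : Decidable (Spec_self_describe items out) := by unfold Spec_self_describe; infer_instance

-- ===== CLAIM (what is proved, stated in full; the proofs are below) =====
def Claim_equal_self_describe : Prop := ∀ (items : List Int), Dom_self_describe items → Spec_self_describe items (self_describe items)

-- ===== LEMMAS AND PROOFS =====

-- cost of one part / of a partition, in ℕ
def costN (items : List Int) (k : Nat) : Nat := k - items.count (k : Int)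

def costNp (items : List Int) (p : List Nat) : Nat := (p.map (costN items)).sum

-- the knapsack value: min cost over partitions of s into distinct parts from {1..v} (⊤ if none)
def Sdp (items : List Int) (s : Nat) : Nat → WithTop Nat
  | 0 => if s = 0 then 0 else ⊤
  | v + 1 =>
    if v + 1 ≤ s then
      min (Sdp items s v) (WithTop.some (costN items (v + 1)) + Sdp items (s - (v + 1)) v)
    else Sdp items s v

-- min cost over a list of partitions
def MI (items : List Int) (l : List (List Nat)) : WithTop Nat :=
  l.foldr (fun p acc => min (WithTop.some (costNp items p)) acc) ⊤

theorem Sdp_zero (items : List Int) (v : Nat) : Sdp items 0 v = 0 := by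
  induction v with
  | zero => simp [Sdp]
  | succ v ih => simp [Sdp, ih]

theorem Sdp_top (items : List Int) (s : Nat) (hs : 0 < s) :
    ∀ k, k * (k + 1) < 2 * s → Sdp items s k = ⊤ := by
  intro k
  induction k with
  | zero => intro _; simp [Sdp]; omega
  | succ v ih =>
    intro h
    have h1 : v * (v + 1) < 2 * s := by nlinarith
    by_cases hvs : v + 1 ≤ s
    · have h0 : 0 < s - (v + 1) := by
        rcases Nat.eq_zero_or_pos (s - (v + 1)) with hz | hp
        · exfalso
          have hsv : s = v + 1 := by omega
          subst hsv; nlinarith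
        · exact hp
      have hsum : 2 * s = 2 * (s - (v + 1)) + 2 * (v + 1) := by omega
      have h2 : v * (v + 1) < 2 * (s - (v + 1)) := by nlinarith
      have := Sdp_top items (s - (v + 1)) h0 v h2
      simp [Sdp, hvs, ih h1, this]
    · simp [Sdp, hvs, ih h1]

theorem Sdp_trunc (items : List Int) (s : Nat) :
    ∀ v, s ≤ v → Sdp items s v = Sdp items s s := by
  intro v
  induction v with
  | zero => intro h; have : s = 0 := by omega
            subst this; rfl
  | succ v ih =>
    intro h
    rcases Nat.lt_or_ge s (v + 1) with h1 | h1
    · have : ¬ (v + 1 ≤ s) := by omega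
      rw [show Sdp items s (v+1) = Sdp items s v by simp [Sdp, this]]
      exact ih (by omega)
    · have : s = v + 1 := by omega
      subst this; rfl

theorem costN_le (items : List Int) (k : Nat) : costN items k ≤ k := Nat.sub_le _ _

theorem Sdp_le (items : List Int) :
    ∀ v s, Sdp items s v ≠ ⊤ → Sdp items s v ≤ (s : WithTop Nat) := by
  intro v
  induction v with
  | zero =>
    intro s h
    by_cases hs : s = 0
    · subst hs; simp [Sdp]
    · simp [Sdp, hs] at h
  | succ v ih =>
    intro s h
    by_cases hvs : v + 1 ≤ s
    · rw [Sdp, if_pos hvs] at h ⊢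
      by_cases hA : Sdp items s v = ⊤
      · rw [hA] at h ⊢
        have hB : Sdp items (s - (v + 1)) v ≠ ⊤ := by
          intro hB; rw [hB] at h; simp at h
        have h1 := ih _ hB
        calc min ⊤ (WithTop.some (costN items (v + 1)) + Sdp items (s - (v + 1)) v)
            ≤ WithTop.some (costN items (v + 1)) + Sdp items (s - (v + 1)) v := min_le_right _ _
          _ ≤ WithTop.some (v + 1) + WithTop.some (s - (v + 1)) := by
              exact add_le_add (by exact_mod_cast WithTop.coe_le_coe.mpr (costN_le items (v+1))) h1
          _ = WithTop.some s := by
              exact_mod_cast congrArg (Nat.cast : Nat → WithTop Nat) (Nat.add_sub_cancel' hvs)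
      · exact le_trans (min_le_left _ _) (ih _ hA)
    · rw [Sdp, if_neg hvs] at h ⊢
      exact ih _ h

theorem MI_top_iff (items : List Int) (l : List (List Nat)) : MI items l = ⊤ ↔ l = [] := by
  cases l with
  | nil => simp [MI]
  | cons p t =>
    simp only [MI, List.foldr_cons]
    rw [min_eq_top]
    simp

theorem MI_foldr_init (items : List Int) (l : List (List Nat)) :
    ∀ e : WithTop Nat,
      l.foldr (fun p acc => min (WithTop.some (costNp items p)) acc) e
        = min (MI items l) e := by
  induction l with
  | nil => intro e; simp [MI]
  | cons p t ih =>
    intro e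
    simp only [MI, List.foldr_cons] at *
    rw [ih e, min_assoc]

theorem MI_append (items : List Int) (a b : List (List Nat)) :
    MI items (a ++ b) = min (MI items a) (MI items b) := by
  simp only [MI, List.foldr_append]
  exact MI_foldr_init items a (MI items b)

theorem MI_map_cons (items : List Int) (k : Nat) (l : List (List Nat)) :
    MI items (l.map (fun p => k :: p)) = WithTop.some (costN items k) + MI items l := by
  induction l with
  | nil => simp [MI]
  | cons p t ih =>
    simp only [MI, List.map_cons, List.foldr_cons] at *
    rw [ih]
    have h1 : WithTop.some (costNp items (k :: p))
        = WithTop.some (costN items k) + WithTop.some (costNp items p) := by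
      exact_mod_cast (show costNp items (k :: p) = costN items k + costNp items p by simp [costNp])
    rw [h1, min_add_add_left]

theorem Sdp_min_eq (items : List Int) (m k : Nat) :
    Sdp items m (min m k) = Sdp items m k := by
  rcases Nat.le_total m k with h | h
  · rw [Nat.min_eq_left h, Sdp_trunc items m k h]
  · rw [Nat.min_eq_right h]

theorem MI_partsA (items : List Int) :
    ∀ s k, k ≤ s → MI items (partsA s k) = Sdp items s k := by
  intro s k
  induction s, k using partsA.induct with
  | case1 k =>
    intro _
    rw [partsA]
    simp [MI, costNp, Sdp_zero]
  | case2 n k h1 h2 ih1 ih2 =>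
    intro hks
    have hk : 1 ≤ k := by
      rcases Nat.eq_zero_or_pos k with h | h
      · subst h; simp at h2; omega
      · exact h
    rw [partsA, dif_neg h1, dif_pos h2]
    rw [MI_append, MI_map_cons]
    rw [ih1 (Nat.min_le_left _ _), ih2 (by omega)]
    rw [Sdp_min_eq]
    obtain ⟨v, rfl⟩ : ∃ v, k = v + 1 := ⟨k - 1, by omega⟩
    rw [show Sdp items n (v + 1)
          = min (Sdp items n v) (WithTop.some (costN items (v + 1)) + Sdp items (n - (v + 1)) v)
        from by rw [Sdp, if_pos hks]]
    simp only [Nat.add_sub_cancel]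
    rw [min_comm]
  | case3 n k h1 h2 =>
    intro _
    rw [partsA, dif_neg h1, dif_neg h2]
    have : MI items ([] : List (List Nat)) = ⊤ := rfl
    rw [this, Sdp_top items n (by omega) k (by omega)]

theorem Sdp_ne_top (items : List Int) (n : Nat) : Sdp items n n ≠ ⊤ := by
  rcases Nat.eq_zero_or_pos n with hn | hn
  · subst hn; simp [Sdp]
  obtain ⟨v, rfl⟩ : ∃ v, n = v + 1 := ⟨n - 1, by omega⟩
  rw [Sdp, if_pos (le_refl _)]
  simp only [Nat.sub_self, Sdp_zero]
  intro hcontra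
  rw [min_eq_top] at hcontra
  obtain ⟨_, h⟩ := hcontra
  rw [add_zero] at h
  simp at h

-- ⊤ ↦ n+1, ↑m ↦ m : the Int encoding B's dp row uses for "unreachable"
def toI (n : Nat) (x : WithTop Nat) : Int :=
  WithTop.recTopCoe ((n : Int) + 1) (fun m => (m : Int)) x

theorem toI_top (n : Nat) : toI n ⊤ = (n : Int) + 1 := rfl
theorem toI_coe (n m : Nat) : toI n (WithTop.some m) = (m : Int) := rfl

theorem castmax (items : List Int) (x : Nat) :
    max 0 ((x : Int) - ((List.count (x : Int) items : Nat) : Int)) = ((costN items x : Nat) : Int) := by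
  unfold costN
  simp only [List.count]
  omega

theorem innerSum (items : List Int) :
    ∀ (p : List Nat) (acc : Int),
      p.foldl (fun (acc : Int) (x : Nat) => acc + ((costN items x : Nat) : Int)) acc
        = acc + ((costNp items p : Nat) : Int) := by
  intro p
  induction p with
  | nil => intro acc; simp [costNp]
  | cons x t ih =>
    intro acc
    rw [List.foldl_cons, ih]
    have h : costNp items (x :: t) = costN items x + costNp items t := by simp [costNp]
    rw [h]
    push_cast
    ring

theorem foldA (items : List Int) :
    ∀ (l : List (List Nat)) (b : Int) (m : Nat), MI items l = WithTop.some m →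
      l.foldl (fun best p => min best ((costNp items p : Nat) : Int)) b = min b (m : Int) := by
  intro l
  induction l with
  | nil =>
    intro b m h
    simp [MI] at h
  | cons p t ih =>
    intro b m h
    have hmi : MI items (p :: t) = min (WithTop.some (costNp items p)) (MI items t) := rfl
    rw [hmi] at h
    simp only [List.foldl_cons]
    by_cases ht : MI items t = ⊤
    · have ht' : t = [] := (MI_top_iff items t).mp ht
      subst ht'
      rw [show MI items ([] : List (List Nat)) = ⊤ from rfl, min_eq_left le_top] at h
      have hcp : costNp items p = m := by exact_mod_cast h
      subst hcp
      simp
    · obtain ⟨m', hm'⟩ := WithTop.ne_top_iff_exists.mp ht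
      rw [← hm'] at h
      have hm : min (costNp items p) m' = m := by exact_mod_cast h
      rw [ih (min b ((costNp items p : Nat) : Int)) m' hm'.symm]
      rw [← hm, Nat.cast_min, min_assoc]

theorem getD_range_map (f : Nat → Int) (m s : Nat) (h : s < m) :
    (((List.range m).map f).getD s 0) = f s := by
  simp [List.getD_eq_getElem?_getD, h]

theorem toI_step (n s v c : Nat) (A B : WithTop Nat)
    (hc : c ≤ v + 1) (hv : v + 1 ≤ s) (hs : s ≤ n)
    (hA : A ≠ ⊤ → A ≤ WithTop.some s)
    (hB : B ≠ ⊤ → B ≤ WithTop.some (s - (v + 1))) :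
    min (toI n A) (toI n B + (c : Int)) = toI n (min A (WithTop.some c + B)) := by
  induction A using WithTop.recTopCoe with
  | top =>
    induction B using WithTop.recTopCoe with
    | top =>
      rw [show WithTop.some c + (⊤ : WithTop Nat) = ⊤ from WithTop.add_top _]
      rw [min_self]
      rw [toI_top]
      omega
    | coe b =>
      have hb : b ≤ s - (v + 1) := by exact_mod_cast hB (WithTop.coe_ne_top)
      rw [show WithTop.some c + WithTop.some b = WithTop.some (c + b) from by norm_cast]
      rw [min_eq_right le_top, toI_top, toI_coe, toI_coe]
      push_cast
      omega
  | coe a =>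
    have ha : a ≤ s := by exact_mod_cast hA (WithTop.coe_ne_top)
    induction B using WithTop.recTopCoe with
    | top =>
      rw [show WithTop.some c + (⊤ : WithTop Nat) = ⊤ from WithTop.add_top _]
      rw [min_eq_left le_top, toI_top, toI_coe]
      omega
    | coe b =>
      have hb : b ≤ s - (v + 1) := by exact_mod_cast hB (WithTop.coe_ne_top)
      rw [show WithTop.some c + WithTop.some b = WithTop.some (c + b) from by norm_cast]
      rw [show min (WithTop.some a) (WithTop.some (c + b)) = WithTop.some (min a (c + b)) from by norm_cast]
      rw [toI_coe, toI_coe, toI_coe]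
      push_cast
      omega

theorem bInv (items : List Int) (n : Nat) :
    ∀ v s, s ≤ n →
      (bRow n (fun v => ((costN items v : Nat) : Int)) v).getD s 0 = toI n (Sdp items s v) := by
  intro v
  induction v with
  | zero =>
    intro s hs
    cases s with
    | zero => rfl
    | succ s =>
      have h1 : (List.replicate n ((n : Int) + 1)).getD s 0 = (n : Int) + 1 := by
        rw [List.getD_eq_getElem?_getD]
        rw [List.getElem?_replicate]
        simp [Nat.lt_of_succ_le hs]
      have h2 : Sdp items (s + 1) 0 = ⊤ := by simp [Sdp]
      simp only [bRow, List.getD_cons_succ, h1, h2, toI_top]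
  | succ v ih =>
    intro s hs
    rw [show bRow n (fun v => ((costN items v : Nat) : Int)) (v + 1)
          = (List.range (n + 1)).map (fun s =>
              if s < v + 1 then (bRow n (fun v => ((costN items v : Nat) : Int)) v).getD s 0
              else min ((bRow n (fun v => ((costN items v : Nat) : Int)) v).getD s 0)
                ((bRow n (fun v => ((costN items v : Nat) : Int)) v).getD (s - (v + 1)) 0
                  + ((costN items (v + 1) : Nat) : Int)))
        from rfl]
    rw [getD_range_map _ _ _ (by omega)]
    by_cases hvs : s < v + 1
    · rw [if_pos hvs, ih s hs]
      congr 1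
      rw [Sdp, if_neg (by omega)]
    · rw [if_neg hvs]
      rw [ih s hs, ih (s - (v + 1)) (by omega)]
      rw [show Sdp items s (v + 1)
            = min (Sdp items s v) (WithTop.some (costN items (v + 1)) + Sdp items (s - (v + 1)) v)
          from by rw [Sdp, if_pos (by omega)]]
      exact toI_step n s v (costN items (v + 1)) _ _ (costN_le items (v + 1)) (by omega) hs
        (Sdp_le items v s) (Sdp_le items v (s - (v + 1)))

-- ===== VERDICT (by name: the statement is the Claim_ definition above) =====
theorem self_describe_spec : Claim_equal_self_describe := by
  intro items _
  unfold Spec_self_describe self_describe self_describe_alt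
  simp only [PySem.Dict.foldl_insert_getD_add_one_eq_counter, PySem.Dict.getD_counter]
  simp only [castmax]
  simp only [innerSum, zero_add]
  set n := items.length with hdefn
  obtain ⟨m, hm⟩ := WithTop.ne_top_iff_exists.mp (Sdp_ne_top items n)
  have hMI : MI items (partsA n n) = WithTop.some m := by
    rw [MI_partsA items n n (le_refl n), ← hm]
  have hle : Sdp items n n ≤ WithTop.some n := Sdp_le items n n (by rw [← hm]; exact WithTop.coe_ne_top)
  rw [← hm] at hle
  have hmn : m ≤ n := WithTop.coe_le_coe.mp hle
  rw [foldA items _ _ _ hMI]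
  have hB : (bRow n (fun v => ((costN items v : Nat) : Int)) n).getD n 0
      = toI n (Sdp items n n) := bInv items n n n (le_refl n)
  rw [hB, ← hm, toI_coe]
  omega
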